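-- pv_equiv track=rewrite | github.com/SMaric93/CEO-Recommender | ceo_firm_matching/network_features.py | compute_ceo_firm_network_distance
-- ===== SOURCE A (Python) =====
-- from typing import Dict, Optional, Tuple, List
--
-- def compute_ceo_firm_network_distance(
--     adjacency: Dict[int, set],
--     ceo_id: int,
--     firm_board_ids: List[int],
--     max_hops: int = 3,
-- ) -> int:
--     """
--     BFS shortest path from CEO to any member of the firm's board.
--
--     Returns:
--         Minimum number of hops (1 = direct connection, max_hops+1 = unreachable)
--     """
--     if ceo_id in firm_board_ids:
--         return 0
--
--     visited = {ceo_id}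
--     frontier = {ceo_id}
--     target_set = set(firm_board_ids)
--
--     for hop in range(1, max_hops + 1):
--         next_frontier = set()
--         for node in frontier:
--             for neighbor in adjacency.get(node, set()):
--                 if neighbor in target_set:
--                     return hop
--                 if neighbor not in visited:
--                     visited.add(neighbor)
--                     next_frontier.add(neighbor)
--         frontier = next_frontier
--         if not frontier:
--             break
--
--     return max_hops + 1  # Unreachable
-- ===== SOURCE B (Python) =====
-- def compute_ceo_firm_network_distance(adjacency, ceo_id, firm_board_ids, max_hops=3):
--     """Hop-bounded Bellman-Ford: relax every edge list once per hop into a distance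
--     table (stopping early once a pass relaxes nothing), then take the minimum
--     recorded distance over the firm's board members."""
--     if ceo_id in firm_board_ids:
--         return 0
--     dist = {ceo_id: 0}
--     for hop in range(1, max_hops + 1):
--         updated = False
--         for node, nbrs in adjacency.items():
--             if dist.get(node) == hop - 1:
--                 for nb in nbrs:
--                     if nb not in dist:
--                         dist[nb] = hop
--                         updated = True
--         if not updated:
--             break
--     best = max_hops + 1
--     for t in firm_board_ids:
--         d = dist.get(t)
--         if d is not None and d < best:
--             best = d
--     return best
-- ===== Notes on version B (the rewrite author's own statement) =====
-- stated objective: alternative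
-- what changed: Replaces A's BFS (visited/frontier/next_frontier set traversal with early return inside the neighbor scan) by a hop-bounded Bellman-Ford relaxation: each hop scans the whole adjacency dict and labels unlabeled neighbors of nodes at distance hop-1, then the answer is the minimum recorded distance over the board members (default max_hops+1).
import Mathlib
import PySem

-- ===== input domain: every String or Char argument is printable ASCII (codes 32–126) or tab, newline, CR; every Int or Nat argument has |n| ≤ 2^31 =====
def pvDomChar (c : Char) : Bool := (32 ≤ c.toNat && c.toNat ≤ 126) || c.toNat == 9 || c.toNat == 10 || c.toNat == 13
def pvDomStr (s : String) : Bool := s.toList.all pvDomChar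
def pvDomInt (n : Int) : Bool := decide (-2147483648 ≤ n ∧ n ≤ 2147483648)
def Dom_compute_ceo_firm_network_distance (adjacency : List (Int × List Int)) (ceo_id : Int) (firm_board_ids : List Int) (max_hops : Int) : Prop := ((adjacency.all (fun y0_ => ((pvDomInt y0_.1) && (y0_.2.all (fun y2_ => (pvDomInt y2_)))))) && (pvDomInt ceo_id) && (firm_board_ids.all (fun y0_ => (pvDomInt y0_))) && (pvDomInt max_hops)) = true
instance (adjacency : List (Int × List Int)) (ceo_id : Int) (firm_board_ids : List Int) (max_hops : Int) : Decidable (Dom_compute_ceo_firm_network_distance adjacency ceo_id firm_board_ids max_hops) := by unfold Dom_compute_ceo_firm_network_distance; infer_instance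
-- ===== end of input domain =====

-- B replaces A's queue-free level BFS (frontier/next_frontier set passes with early return)
-- by a hop-bounded Bellman-Ford relaxation over the whole adjacency dict followed by a
-- minimum over the board members; same results, similar cost (objective: alternative).


-- ===== PORT A =====
-- inner `for neighbor in adjacency.get(node, set())` loop; `none` = `return hop` fired.
-- (A iterates Python sets; its result is order-independent, so iterating the stored
-- lists is exact.)
def aExpand (target : PySem.Set Int) (visited nf : PySem.Set Int) : List Int → Option (PySem.Set Int × PySem.Set Int)
  | [] => some (visited, nf)
  | n :: rest =>
    if target.contains n then none
    else if visited.contains n then aExpand target visited nf rest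
    else aExpand target (visited.add n) (nf.add n) rest

-- `for node in frontier` loop of one hop, threading (visited, next_frontier)
def aLevel (adj : PySem.Dict Int (List Int)) (target : PySem.Set Int) : List Int → PySem.Set Int → PySem.Set Int → Option (PySem.Set Int × PySem.Set Int)
  | [], visited, nf => some (visited, nf)
  | node :: rest, visited, nf =>
    match aExpand target visited nf (adj.getD node []) with
    | none => none
    | some p => aLevel adj target rest p.1 p.2

-- `for hop in range(1, max_hops + 1)` with the early returns and the `break`;
-- range(1, max_hops+1) is consumed lazily, so it is ported as a counted recursion:
-- the Nat is the number of iterations left, the Int the current `hop`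
def aLoop (adj : PySem.Dict Int (List Int)) (target : PySem.Set Int) (max_hops : Int) : Nat → Int → PySem.Set Int → PySem.Set Int → Int
  | 0, _, _, _ => max_hops + 1
  | k + 1, hop, visited, frontier =>
    match aLevel adj target frontier visited [] with
    | none => hop
    | some p => if p.2 = [] then max_hops + 1 else aLoop adj target max_hops k (hop + 1) p.1 p.2

def compute_ceo_firm_network_distance (adjacency : List (Int × List Int)) (ceo_id : Int) (firm_board_ids : List Int) (max_hops : Int) : Int :=
  if firm_board_ids.contains ceo_id then 0
  else
    let adj := PySem.Dict.ofList adjacency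
    let target := PySem.Set.ofList firm_board_ids
    aLoop adj target max_hops max_hops.toNat 1 [ceo_id] [ceo_id]

-- ===== PORT B =====
-- inner `for nb in nbrs: if nb not in dist: dist[nb] = hop; updated = True`
def bRelax (hop : Int) : List Int → PySem.Dict Int Int → Bool → PySem.Dict Int Int × Bool
  | [], dist, upd => (dist, upd)
  | nb :: rest, dist, upd =>
    if dist.contains nb then bRelax hop rest dist upd
    else bRelax hop rest (dist.insert nb hop) true

-- `for node, nbrs in adjacency.items(): if dist.get(node) == hop - 1: …`
def bPass (hop : Int) : List (Int × List Int) → PySem.Dict Int Int → Bool → PySem.Dict Int Int × Bool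
  | [], dist, upd => (dist, upd)
  | (node, nbrs) :: rest, dist, upd =>
    if dist.get? node == some (hop - 1) then
      match bRelax hop nbrs dist upd with
      | (dist', upd') => bPass hop rest dist' upd'
    else bPass hop rest dist upd

-- `for hop in range(1, max_hops + 1)` with `if not updated: break`: counted
-- recursion, the Int is the current hop
def bHops (items : List (Int × List Int)) : Nat → Int → PySem.Dict Int Int → PySem.Dict Int Int
  | 0, _, dist => dist
  | k + 1, hop, dist =>
    match bPass hop items dist false with
    | (dist', true) => bHops items k (hop + 1) dist'
    | (dist', false) => dist'

-- `best` accumulator loop over firm_board_ids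
def bBest (dist : PySem.Dict Int Int) : List Int → Int → Int
  | [], best => best
  | t :: rest, best =>
    match dist.get? t with
    | some d => bBest dist rest (if d < best then d else best)
    | none => bBest dist rest best

def compute_ceo_firm_network_distance_alt (adjacency : List (Int × List Int)) (ceo_id : Int) (firm_board_ids : List Int) (max_hops : Int) : Int :=
  if firm_board_ids.contains ceo_id then 0
  else
    let adj := PySem.Dict.ofList adjacency
    let dist := bHops adj.items max_hops.toNat 1 (PySem.Dict.empty.insert ceo_id 0)
    bBest dist firm_board_ids (max_hops + 1)

-- ===== PRECONDITION & SPEC =====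
def Spec_compute_ceo_firm_network_distance (adjacency : List (Int × List Int)) (ceo_id : Int) (firm_board_ids : List Int) (max_hops : Int) (out : Int) : Prop := out = compute_ceo_firm_network_distance_alt adjacency ceo_id firm_board_ids max_hops
instance (adjacency : List (Int × List Int)) (ceo_id : Int) (firm_board_ids : List Int) (max_hops : Int) (out : Int) : Decidable (Spec_compute_ceo_firm_network_distance adjacency ceo_id firm_board_ids max_hops out) := by unfold Spec_compute_ceo_firm_network_distance; infer_instance

-- ===== CLAIM (what is proved, stated in full; the proofs are below) =====
def Claim_equal_compute_ceo_firm_network_distance : Prop := ∀ (adjacency : List (Int × List Int)) (ceo_id : Int) (firm_board_ids : List Int) (max_hops : Int), Dom_compute_ceo_firm_network_distance adjacency ceo_id firm_board_ids max_hops → Spec_compute_ceo_firm_network_distance adjacency ceo_id firm_board_ids max_hops (compute_ceo_firm_network_distance adjacency ceo_id firm_board_ids max_hops)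

-- ===== LEMMAS AND PROOFS =====

-- the nodes B's pass at hop `h` would label from dict `D`
def condAny (h : Int) (items : List (Int × List Int)) (D : PySem.Dict Int Int) (x : Int) : Bool :=
  items.any (fun p => (D.get? p.1 == some (h - 1)) && p.2.contains x)

lemma relax_get (h : Int) : ∀ (nbrs : List Int) (D : PySem.Dict Int Int) (u : Bool) (x : Int),
    (bRelax h nbrs D u).1.get? x = (D.get? x).or (if nbrs.contains x then some h else none) := by
  intro nbrs
  induction nbrs with
  | nil => intro D u x; simp [bRelax]
  | cons nb rest ih =>
    intro D u x
    rw [bRelax]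
    by_cases hc : D.contains nb = true
    · rw [if_pos hc, ih D u x]
      by_cases hx : x = nb
      · subst hx
        have hs : (D.get? x).isSome := by rw [← PySem.Dict.contains_eq_isSome_get?]; exact hc
        cases hg : D.get? x with
        | none => rw [hg] at hs; simp at hs
        | some v => simp [Option.or]
      · simp [hx]
    · rw [if_neg hc, ih _ true x]
      have hn : D.get? nb = none := (PySem.Dict.get?_eq_none_iff_contains D nb).2 (by simpa using hc)
      by_cases hx : x = nb
      · subst hx
        rw [PySem.Dict.get?_insert, if_pos rfl, hn]
        simp [Option.or]
      · rw [PySem.Dict.get?_insert, if_neg hx]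
        simp [hx]

lemma relax_level (h : Int) (nbrs : List Int) (D : PySem.Dict Int Int) (u : Bool) (y : Int) :
    ((bRelax h nbrs D u).1.get? y == some (h - 1)) = (D.get? y == some (h - 1)) := by
  rw [relax_get]
  cases hg : D.get? y with
  | some v => simp [Option.or]
  | none =>
    by_cases hm : nbrs.contains y = true
    · rw [if_pos hm]; simp [Option.or]; omega
    · rw [if_neg hm]; simp [Option.or]

-- the `updated` flag never resets
lemma relax_flag_mono (h : Int) : ∀ (nbrs : List Int) (D : PySem.Dict Int Int),
    (bRelax h nbrs D true).2 = true := by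
  intro nbrs
  induction nbrs with
  | nil => intro D; simp [bRelax]
  | cons nb rest ih =>
    intro D
    rw [bRelax]
    by_cases hc : D.contains nb = true
    · rw [if_pos hc]; exact ih D
    · rw [if_neg hc]; exact ih _

lemma relax_flag (h : Int) : ∀ (nbrs : List Int) (D : PySem.Dict Int Int) (u : Bool),
    (bRelax h nbrs D u).2 = true ↔ (u = true ∨ ∃ x ∈ nbrs, D.get? x = none) := by
  intro nbrs
  induction nbrs with
  | nil => intro D u; simp [bRelax]
  | cons nb rest ih =>
    intro D u
    rw [bRelax]
    by_cases hc : D.contains nb = true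
    · rw [if_pos hc, ih D u]
      have hnb : ¬ D.get? nb = none := by
        rw [PySem.Dict.get?_eq_none_iff_contains, hc]
        simp
      constructor
      · rintro (hu | ⟨x, hx, hxn⟩)
        · exact Or.inl hu
        · exact Or.inr ⟨x, List.mem_cons_of_mem _ hx, hxn⟩
      · rintro (hu | ⟨x, hx, hxn⟩)
        · exact Or.inl hu
        · rcases List.mem_cons.1 hx with rfl | hr
          · exact absurd hxn hnb
          · exact Or.inr ⟨x, hr, hxn⟩
    · rw [if_neg hc]
      have hnb : D.get? nb = none :=
        (PySem.Dict.get?_eq_none_iff_contains D nb).2 (by simpa using hc)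
      rw [relax_flag_mono]
      exact ⟨fun _ => Or.inr ⟨nb, by simp, hnb⟩, fun _ => rfl⟩

lemma pass_get (h : Int) : ∀ (items : List (Int × List Int)) (D : PySem.Dict Int Int) (u : Bool) (x : Int),
    (bPass h items D u).1.get? x = (D.get? x).or (if condAny h items D x then some h else none) := by
  intro items
  induction items with
  | nil => intro D u x; simp [bPass, condAny]
  | cons p rest ih =>
    obtain ⟨node, nbrs⟩ := p
    intro D u x
    rw [bPass]
    by_cases hc : (D.get? node == some (h - 1)) = true
    · rw [if_pos hc]
      rcases hr : bRelax h nbrs D u with ⟨D1, u1⟩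
      have hD1 : ∀ y, D1.get? y = (D.get? y).or (if nbrs.contains y then some h else none) := by
        intro y
        have hy := relax_get h nbrs D u y
        rw [hr] at hy
        exact hy
      rw [ih D1 u1 x, hD1 x]
      have hca : condAny h rest D1 x = condAny h rest D x := by
        unfold condAny
        congr 1
        funext q
        have hq := relax_level h nbrs D u q.1
        rw [hr] at hq
        rw [hq]
      rw [hca]
      have hhead : condAny h ((node, nbrs) :: rest) D x
          = (nbrs.contains x || condAny h rest D x) := by
        unfold condAny; rw [List.any_cons]; simp [hc]
      rw [hhead]
      cases hg : D.get? x with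
      | some v => simp [Option.or]
      | none =>
        by_cases h1 : nbrs.contains x = true
        · by_cases h2 : condAny h rest D x = true <;>
            simp only [Option.or, h1, h2] <;> simp
        · by_cases h2 : condAny h rest D x = true <;>
            simp only [Option.or, h1, h2] <;> simp
    · rw [if_neg hc, ih _ _ x]
      rw [Bool.not_eq_true] at hc
      have hhead : condAny h ((node, nbrs) :: rest) D x = condAny h rest D x := by
        unfold condAny; rw [List.any_cons]; simp [hc]
      rw [hhead]

lemma pass_flag (h : Int) : ∀ (items : List (Int × List Int)) (D : PySem.Dict Int Int) (u : Bool),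
    (bPass h items D u).2 = true
      ↔ (u = true ∨ ∃ x, D.get? x = none ∧ condAny h items D x = true) := by
  intro items
  induction items with
  | nil => intro D u; simp [bPass, condAny]
  | cons p rest ih =>
    obtain ⟨node, nbrs⟩ := p
    intro D u
    rw [bPass]
    by_cases hc : (D.get? node == some (h - 1)) = true
    · rw [if_pos hc]
      rcases hr : bRelax h nbrs D u with ⟨D1, u1⟩
      have hD1 : ∀ y, D1.get? y = (D.get? y).or (if nbrs.contains y then some h else none) := by
        intro y
        have hy := relax_get h nbrs D u y
        rw [hr] at hy
        exact hy
      have hca : ∀ y, condAny h rest D1 y = condAny h rest D y := by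
        intro y
        unfold condAny
        congr 1
        funext q
        have hq := relax_level h nbrs D u q.1
        rw [hr] at hq
        rw [hq]
      have hu1 : u1 = true ↔ (u = true ∨ ∃ x ∈ nbrs, D.get? x = none) := by
        have hf := relax_flag h nbrs D u
        rw [hr] at hf
        exact hf
      have hD1none : ∀ y, D1.get? y = none ↔ (D.get? y = none ∧ ¬ nbrs.contains y = true) := by
        intro y
        rw [hD1 y]
        cases hg : D.get? y with
        | some w => simp [Option.or]
        | none => simp [Option.or]
      have hcons : ∀ y, condAny h ((node, nbrs) :: rest) D y
          = (nbrs.contains y || condAny h rest D y) := by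
        intro y
        unfold condAny
        rw [List.any_cons]
        simp [hc]
      rw [ih D1 u1]
      constructor
      · rintro (h1 | ⟨x, hxn, hxc⟩)
        · rcases hu1.1 h1 with h2 | ⟨x, hx, hxn⟩
          · exact Or.inl h2
          · refine Or.inr ⟨x, hxn, ?_⟩
            rw [hcons x]
            simp [List.contains_eq_mem, hx]
        · rw [hD1none x] at hxn
          refine Or.inr ⟨x, hxn.1, ?_⟩
          rw [hcons x]
          rw [hca x] at hxc
          simp [hxc]
      · rintro (h1 | ⟨x, hxn, hxc⟩)
        · exact Or.inl (hu1.2 (Or.inl h1))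
        · rw [hcons x] at hxc
          rcases Bool.or_eq_true_iff.1 hxc with h2 | h2
          · refine Or.inl (hu1.2 (Or.inr ⟨x, ?_, hxn⟩))
            simpa [List.contains_eq_mem] using h2
          · by_cases hmem : nbrs.contains x = true
            · refine Or.inl (hu1.2 (Or.inr ⟨x, ?_, hxn⟩))
              simpa [List.contains_eq_mem] using hmem
            · refine Or.inr ⟨x, (hD1none x).2 ⟨hxn, hmem⟩, ?_⟩
              rw [hca x]
              exact h2
    · rw [if_neg hc, ih D u]
      rw [Bool.not_eq_true] at hc
      have hcons : ∀ y, condAny h ((node, nbrs) :: rest) D y = condAny h rest D y := by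
        intro y
        unfold condAny
        rw [List.any_cons]
        simp [hc]
      constructor
      · rintro (h1 | ⟨x, hxn, hxc⟩)
        · exact Or.inl h1
        · exact Or.inr ⟨x, hxn, by rw [hcons x]; exact hxc⟩
      · rintro (h1 | ⟨x, hxn, hxc⟩)
        · exact Or.inl h1
        · exact Or.inr ⟨x, hxn, by rw [← hcons x]; exact hxc⟩

lemma condAny_iff (h : Int) (adj : PySem.Dict Int (List Int)) (hnd : adj.keys.Nodup)
    (D : PySem.Dict Int Int) (f : PySem.Set Int)
    (hf : ∀ n, n ∈ f ↔ D.get? n = some (h - 1)) (x : Int) :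
    condAny h adj.items D x = true ↔ ∃ node ∈ f, x ∈ adj.getD node [] := by
  unfold condAny
  rw [List.any_eq_true]
  constructor
  · rintro ⟨p, hp, hpred⟩
    rw [Bool.and_eq_true] at hpred
    refine ⟨p.1, (hf p.1).2 (by simpa using hpred.1), ?_⟩
    have hg : adj.get? p.1 = some p.2 := PySem.Dict.get?_of_mem_items adj (by exact hp) hnd
    rw [PySem.Dict.getD_eq_get?_getD, hg]
    simpa using hpred.2
  · rintro ⟨node, hnode, hx⟩
    rw [PySem.Dict.getD_eq_get?_getD] at hx
    cases hg : adj.get? node with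
    | none => rw [hg] at hx; simp at hx
    | some nbrs =>
      rw [hg] at hx
      refine ⟨(node, nbrs), PySem.Dict.mem_items_of_get?_eq_some adj hg, ?_⟩
      rw [Bool.and_eq_true]
      exact ⟨by simpa using (hf node).1 hnode, by simpa using hx⟩

lemma aExpand_none_iff (target : PySem.Set Int) : ∀ (nbrs : List Int) (V nf : PySem.Set Int),
    aExpand target V nf nbrs = none ↔ ∃ x ∈ nbrs, x ∈ target := by
  intro nbrs
  induction nbrs with
  | nil => intro V nf; simp [aExpand]
  | cons n rest ih =>
    intro V nf
    rw [aExpand]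
    by_cases ht : target.contains n = true
    · simp only [if_pos ht]
      exact ⟨fun _ => ⟨n, by simp, (PySem.Set.contains_iff target n).1 ht⟩, fun _ => by trivial⟩
    · rw [if_neg ht]
      have htm : n ∉ target := fun hm => ht ((PySem.Set.contains_iff target n).2 hm)
      have key : ∀ (V' nf' : PySem.Set Int),
          (aExpand target V' nf' rest = none ↔ ∃ x ∈ rest, x ∈ target) →
          (aExpand target V' nf' rest = none ↔ ∃ x ∈ n :: rest, x ∈ target) := by
        intro V' nf' hiff
        rw [hiff]
        constructor
        · rintro ⟨x, hx, hxt⟩; exact ⟨x, List.mem_cons_of_mem _ hx, hxt⟩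
        · rintro ⟨x, hx, hxt⟩
          rcases List.mem_cons.1 hx with rfl | hx'
          · exact absurd hxt htm
          · exact ⟨x, hx', hxt⟩
      by_cases hv : V.contains n = true
      · rw [if_pos hv]; exact key V nf (ih V nf)
      · rw [if_neg hv]; exact key (V.add n) (nf.add n) (ih (V.add n) (nf.add n))

lemma aExpand_some (target : PySem.Set Int) : ∀ (nbrs : List Int) (V nf : PySem.Set Int) p,
    aExpand target V nf nbrs = some p →
      (∀ x, x ∈ p.1 ↔ x ∈ V ∨ x ∈ nbrs) ∧
      (∀ x, x ∈ p.2 ↔ x ∈ nf ∨ (x ∈ nbrs ∧ x ∉ V)) := by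
  intro nbrs
  induction nbrs with
  | nil =>
    intro V nf p hp
    simp only [aExpand, Option.some.injEq] at hp
    constructor <;> intro x <;> simp [← hp]
  | cons n rest ih =>
    intro V nf p hp
    rw [aExpand] at hp
    by_cases ht : target.contains n = true
    · rw [if_pos ht] at hp; cases hp
    · rw [if_neg ht] at hp
      by_cases hv : V.contains n = true
      · rw [if_pos hv] at hp
        obtain ⟨h1, h2⟩ := ih V nf p hp
        have hnV : n ∈ V := (PySem.Set.contains_iff V n).1 hv
        refine ⟨fun x => ?_, fun x => ?_⟩
        · rw [h1 x]; simp only [List.mem_cons]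
          constructor
          · tauto
          · rintro (h | rfl | h) <;> tauto
        · rw [h2 x]; simp only [List.mem_cons]
          constructor
          · tauto
          · rintro (h | ⟨rfl | hr, h'⟩) <;> tauto
      · rw [if_neg hv] at hp
        obtain ⟨h1, h2⟩ := ih (V.add n) (nf.add n) p hp
        have hnV : n ∉ V := fun hm => hv ((PySem.Set.contains_iff V n).2 hm)
        refine ⟨fun x => ?_, fun x => ?_⟩
        · rw [h1 x, PySem.Set.mem_add]; simp only [List.mem_cons]
          constructor
          · rintro ((h | rfl) | h) <;> tauto
          · rintro (h | rfl | h) <;> tauto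
        · rw [h2 x, PySem.Set.mem_add, PySem.Set.mem_add]; simp only [List.mem_cons]
          constructor
          · rintro ((h | rfl) | ⟨h, h'⟩) <;> tauto
          · rintro (h | ⟨rfl | hr, h'⟩)
            · tauto
            · tauto
            · by_cases hxn : x = n
              · tauto
              · exact Or.inr ⟨hr, fun hx => by rcases hx with h2 | h2 <;> [exact h' h2; exact hxn h2]⟩

lemma aLevel_none_iff (adj : PySem.Dict Int (List Int)) (target : PySem.Set Int) :
    ∀ (f : List Int) (V nf : PySem.Set Int),
    aLevel adj target f V nf = none ↔ ∃ node ∈ f, ∃ x ∈ adj.getD node [], x ∈ target := by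
  intro f
  induction f with
  | nil => intro V nf; simp [aLevel]
  | cons node rest ih =>
    intro V nf
    rw [aLevel]
    cases hax : aExpand target V nf (adj.getD node []) with
    | none =>
      simp only
      have := (aExpand_none_iff target (adj.getD node []) V nf).1 hax
      obtain ⟨x, hx, hxt⟩ := this
      exact ⟨fun _ => ⟨node, by simp, x, hx, hxt⟩, fun _ => by trivial⟩
    | some q =>
      simp only
      rw [ih q.1 q.2]
      have hno : ¬∃ x ∈ adj.getD node [], x ∈ target := by
        intro hex
        rw [← aExpand_none_iff target (adj.getD node []) V nf] at hex
        rw [hax] at hex; cases hex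
      constructor
      · rintro ⟨n', hn', hx⟩; exact ⟨n', List.mem_cons_of_mem _ hn', hx⟩
      · rintro ⟨n', hn', hx⟩
        rcases List.mem_cons.1 hn' with rfl | hr
        · exact absurd hx hno
        · exact ⟨n', hr, hx⟩

lemma aLevel_some (adj : PySem.Dict Int (List Int)) (target : PySem.Set Int) :
    ∀ (f : List Int) (V nf : PySem.Set Int) p,
    aLevel adj target f V nf = some p →
      (∀ x, x ∈ p.1 ↔ x ∈ V ∨ ∃ node ∈ f, x ∈ adj.getD node []) ∧
      (∀ x, x ∈ p.2 ↔ x ∈ nf ∨ ∃ node ∈ f, x ∈ adj.getD node [] ∧ x ∉ V) := by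
  intro f
  induction f with
  | nil =>
    intro V nf p hp
    simp only [aLevel, Option.some.injEq] at hp
    constructor <;> intro x <;> simp [← hp]
  | cons node rest ih =>
    intro V nf p hp
    rw [aLevel] at hp
    cases hax : aExpand target V nf (adj.getD node []) with
    | none => rw [hax] at hp; cases hp
    | some q =>
      rw [hax] at hp
      obtain ⟨q1, q2⟩ := aExpand_some target (adj.getD node []) V nf q hax
      obtain ⟨h1, h2⟩ := ih q.1 q.2 p hp
      refine ⟨fun x => ?_, fun x => ?_⟩
      · rw [h1 x]
        simp only [List.mem_cons]
        constructor
        · rintro (hq | ⟨n', hn', hx⟩)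
          · rw [q1 x] at hq
            rcases hq with h | h
            · exact Or.inl h
            · exact Or.inr ⟨node, Or.inl rfl, h⟩
          · exact Or.inr ⟨n', Or.inr hn', hx⟩
        · rintro (h | ⟨n', rfl | hr, hx⟩)
          · exact Or.inl ((q1 x).2 (Or.inl h))
          · exact Or.inl ((q1 x).2 (Or.inr hx))
          · exact Or.inr ⟨n', hr, hx⟩
      · rw [h2 x]
        simp only [List.mem_cons]
        constructor
        · rintro (hq | ⟨n', hn', hx, hxv⟩)
          · rw [q2 x] at hq
            rcases hq with h | ⟨h, h'⟩
            · exact Or.inl h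
            · exact Or.inr ⟨node, Or.inl rfl, h, h'⟩
          · refine Or.inr ⟨n', Or.inr hn', hx, fun hxV => hxv ((q1 x).2 (Or.inl hxV))⟩
        · rintro (h | ⟨n', rfl | hr, hx, hxv⟩)
          · exact Or.inl ((q2 x).2 (Or.inl h))
          · exact Or.inl ((q2 x).2 (Or.inr ⟨hx, hxv⟩))
          · by_cases hxq : x ∈ adj.getD node []
            · exact Or.inl ((q2 x).2 (Or.inr ⟨hxq, hxv⟩))
            · exact Or.inr ⟨n', hr, hx, fun hq1 => by
                rw [q1 x] at hq1
                rcases hq1 with h | h <;> [exact hxv h; exact hxq h]⟩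

lemma hops_pres (items : List (Int × List Int)) : ∀ (k : Nat) (hop : Int) (D : PySem.Dict Int Int)
    (x v : Int), D.get? x = some v → (bHops items k hop D).get? x = some v := by
  intro k
  induction k with
  | zero => intro hop D x v hv; simpa [bHops] using hv
  | succ n ih =>
    intro hop D x v hv
    rw [bHops]
    have hpres : (bPass hop items D false).1.get? x = some v := by
      rw [pass_get, hv]; rfl
    rcases hr : bPass hop items D false with ⟨D1, u1⟩
    rw [hr] at hpres
    cases u1
    · exact hpres
    · exact ih (hop + 1) D1 x v hpres

lemma hops_ge (items : List (Int × List Int)) : ∀ (k : Nat) (hop : Int) (D : PySem.Dict Int Int)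
    (x v : Int), (bHops items k hop D).get? x = some v → D.get? x = some v ∨ hop ≤ v := by
  intro k
  induction k with
  | zero => intro hop D x v hv; left; simpa [bHops] using hv
  | succ n ih =>
    intro hop D x v hv
    rw [bHops] at hv
    rcases hr : bPass hop items D false with ⟨D1, u1⟩
    rw [hr] at hv
    have hD1 : ∀ (w : Int), D1.get? x = some w → D.get? x = some w ∨ hop ≤ w := by
      intro w hw
      have h1 : (bPass hop items D false).1.get? x = some w := by rw [hr]; exact hw
      rw [pass_get] at h1
      cases hg : D.get? x with
      | some w' => rw [hg] at h1; simp [Option.or] at h1; left; rw [h1]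
      | none =>
        rw [hg] at h1
        right
        by_cases hcnd : condAny hop items D x = true
        · rw [if_pos hcnd] at h1
          simp [Option.or] at h1
          omega
        · rw [if_neg hcnd] at h1
          simp [Option.or] at h1
    cases u1
    · exact hD1 v hv
    · rcases ih (hop + 1) D1 x v hv with h1 | h1
      · rcases hD1 v h1 with h2 | h2
        · exact Or.inl h2
        · exact Or.inr h2
      · right; omega

lemma bBest_le_init (D : PySem.Dict Int Int) : ∀ (tg : List Int) (b : Int), bBest D tg b ≤ b := by
  intro tg
  induction tg with
  | nil => intro b; simp [bBest]
  | cons t rest ih =>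
    intro b
    cases hg : D.get? t with
    | none => simp only [bBest, hg]; exact ih b
    | some d =>
      simp only [bBest, hg]
      by_cases hlt : d < b
      · rw [if_pos hlt]; exact le_trans (ih d) (le_of_lt hlt)
      · rw [if_neg hlt]; exact ih b

lemma bBest_le_of_mem (D : PySem.Dict Int Int) : ∀ (tg : List Int) (b t v : Int),
    t ∈ tg → D.get? t = some v → bBest D tg b ≤ v := by
  intro tg
  induction tg with
  | nil => intro b t v ht; simp at ht
  | cons t' rest ih =>
    intro b t v ht hv
    rcases List.mem_cons.1 ht with he | hm
    · subst he
      simp only [bBest, hv]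
      by_cases hlt : v < b
      · rw [if_pos hlt]; exact bBest_le_init D rest v
      · rw [if_neg hlt]
        exact le_trans (bBest_le_init D rest b) (by omega)
    · cases hg : D.get? t' with
      | none => simp only [bBest, hg]; exact ih b t v hm hv
      | some d => simp only [bBest, hg]; exact ih _ t v hm hv

lemma bBest_ge (D : PySem.Dict Int Int) : ∀ (tg : List Int) (b m : Int),
    (∀ t ∈ tg, ∀ v, D.get? t = some v → m ≤ v) → m ≤ b → m ≤ bBest D tg b := by
  intro tg
  induction tg with
  | nil => intro b m _ hb; simpa [bBest] using hb
  | cons t rest ih =>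
    intro b m hall hb
    cases hg : D.get? t with
    | none =>
      simp only [bBest, hg]
      exact ih b m (fun t' ht' => hall t' (List.mem_cons_of_mem _ ht')) hb
    | some d =>
      simp only [bBest, hg]
      have hmd : m ≤ d := hall t (by simp) d hg
      by_cases hlt : d < b
      · rw [if_pos hlt]; exact ih d m (fun t' ht' => hall t' (List.mem_cons_of_mem _ ht')) hmd
      · rw [if_neg hlt]; exact ih b m (fun t' ht' => hall t' (List.mem_cons_of_mem _ ht')) hb

lemma aLoop_nil_frontier (adj : PySem.Dict Int (List Int)) (target : PySem.Set Int) (mh : Int) :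
    ∀ (k : Nat) (h : Int) (V : PySem.Set Int), aLoop adj target mh k h V [] = mh + 1 := by
  intro k h V
  cases k with
  | zero => rw [aLoop]
  | succ n => rw [aLoop]; simp [aLevel]

lemma bBest_none (D : PySem.Dict Int Int) (tg : List Int) (b : Int)
    (h4 : ∀ t ∈ tg, D.get? t = none) : bBest D tg b = b := by
  induction tg with
  | nil => rw [bBest]
  | cons t rest ih =>
    simp only [bBest, h4 t (by simp)]
    exact ih fun t' ht' => h4 t' (List.mem_cons_of_mem _ ht')

-- a pass only keeps old values or writes the current hop
lemma hD'val_aux (h : Int) (items : List (Int × List Int)) (D : PySem.Dict Int Int)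
    (x v : Int) (hv : (bPass h items D false).1.get? x = some v) :
    D.get? x = some v ∨ v = h := by
  rw [pass_get] at hv
  cases hg : D.get? x with
  | some w => rw [hg] at hv; simp [Option.or] at hv; left; rw [hv]
  | none =>
    rw [hg] at hv
    right
    by_cases hcx : condAny h items D x = true
    · rw [if_pos hcx] at hv; simpa [Option.or] using hv.symm
    · rw [if_neg hcx] at hv; simp [Option.or] at hv

-- main simulation: A's hop loop against B's relaxation passes + final minimum
lemma sim (adjItems : PySem.Dict Int (List Int)) (hnd : adjItems.keys.Nodup)
    (tg : List Int) (mh : Int) :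
    ∀ (k : Nat) (h : Int) (V f : PySem.Set Int) (D : PySem.Dict Int Int),
    (k ≠ 0 → (k : Int) + h ≤ mh + 1) →
    (∀ x, x ∈ V ↔ (D.get? x).isSome) →
    (∀ x, x ∈ f ↔ D.get? x = some (h - 1)) →
    (∀ x v, D.get? x = some v → v ≤ h - 1) →
    (∀ t ∈ tg, D.get? t = none) →
    aLoop adjItems (PySem.Set.ofList tg) mh k h V f
      = bBest (bHops adjItems.items k h D) tg (mh + 1) := by
  intro k
  induction k with
  | zero =>
    intro h V f D _ _ _ _ I4
    rw [aLoop, bHops, bBest_none _ _ _ I4]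
  | succ n ih =>
    intro h V f D hk I1 I2 I3 I4
    rw [aLoop, bHops]
    rcases hr : bPass h adjItems.items D false with ⟨D', u⟩
    have hD'get : ∀ x, D'.get? x
        = (D.get? x).or (if condAny h adjItems.items D x then some h else none) := by
      intro x
      have hx := pass_get h adjItems.items D false x
      rw [hr] at hx
      exact hx
    have hcond : ∀ x, condAny h adjItems.items D x = true
        ↔ ∃ node ∈ f, x ∈ adjItems.getD node [] := fun x => condAny_iff h adjItems hnd D f I2 x
    have hmh : h ≤ mh := by
      have := hk (Nat.succ_ne_zero n)
      push_cast at this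
      omega
    have hxVnone : ∀ x, x ∉ V ↔ D.get? x = none := by
      intro x
      rw [I1 x]
      cases D.get? x <;> simp
    cases u with
    | false =>
      dsimp only
      have hnoupd : ¬ (bPass h adjItems.items D false).2 = true := by rw [hr]; simp
      have hnonew : ∀ x, ¬ (D.get? x = none ∧ condAny h adjItems.items D x = true) := by
        intro x hx
        exact hnoupd ((pass_flag h adjItems.items D false).2 (Or.inr ⟨x, hx.1, hx.2⟩))
      have hI4' : ∀ t ∈ tg, D'.get? t = none := by
        intro t ht
        rw [hD'get t, I4 t ht]
        by_cases hcx : condAny h adjItems.items D t = true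
        · exact absurd ⟨I4 t ht, hcx⟩ (hnonew t)
        · rw [if_neg hcx]; rfl
      cases hal : aLevel adjItems (PySem.Set.ofList tg) f V [] with
      | none =>
        exfalso
        obtain ⟨node, hnode, t, htadj, htg⟩ := (aLevel_none_iff _ _ f V []).1 hal
        have htg' : t ∈ tg := (PySem.Set.mem_ofList tg t).1 htg
        exact hnonew t ⟨I4 t htg', (hcond t).2 ⟨node, hnode, htadj⟩⟩
      | some p =>
        dsimp only
        obtain ⟨P1, P2⟩ := aLevel_some _ _ f V [] p hal
        have hpe : p.2 = ([] : List Int) := by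
          rw [List.eq_nil_iff_forall_not_mem]
          intro x hx
          rcases (P2 x).1 hx with hx0 | ⟨n', hn', hxa, hxv⟩
          · simp at hx0
          · exact hnonew x ⟨(hxVnone x).1 hxv, (hcond x).2 ⟨n', hn', hxa⟩⟩
        rw [if_pos hpe, bBest_none _ _ _ hI4']
    | true =>
      dsimp only
      cases hal : aLevel adjItems (PySem.Set.ofList tg) f V [] with
      | none =>
        dsimp only
        obtain ⟨node, hnode, t, htadj, htg⟩ := (aLevel_none_iff _ _ f V []).1 hal
        have htg' : t ∈ tg := (PySem.Set.mem_ofList tg t).1 htg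
        have hD't : D'.get? t = some h := by
          rw [hD'get t, I4 t htg', if_pos ((hcond t).2 ⟨node, hnode, htadj⟩)]
          rfl
        have hfin : (bHops adjItems.items n (h + 1) D').get? t = some h :=
          hops_pres _ n (h + 1) D' t h hD't
        have hle : bBest (bHops adjItems.items n (h + 1) D') tg (mh + 1) ≤ h :=
          bBest_le_of_mem _ tg (mh + 1) t h htg' hfin
        have hge : h ≤ bBest (bHops adjItems.items n (h + 1) D') tg (mh + 1) := by
          apply bBest_ge
          · intro t' ht' v hv
            rcases hops_ge _ n (h + 1) D' t' v hv with h1 | h1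
            · rcases hD'val_aux h adjItems.items D t' v (by rw [hr]; exact h1) with h2 | h2
              · rw [I4 t' ht'] at h2; cases h2
              · omega
            · omega
          · omega
        omega
      | some p =>
        dsimp only
        obtain ⟨P1, P2⟩ := aLevel_some _ _ f V [] p hal
        have hnohit : ¬∃ node ∈ f, ∃ x ∈ adjItems.getD node [], x ∈ PySem.Set.ofList tg := by
          rw [← aLevel_none_iff adjItems (PySem.Set.ofList tg) f V [], hal]
          simp
        have hD'someIff : ∀ x, (D'.get? x).isSome = true
            ↔ ((D.get? x).isSome = true ∨ ∃ node ∈ f, x ∈ adjItems.getD node []) := by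
          intro x
          rw [hD'get x, ← hcond x]
          cases D.get? x <;> by_cases hcx : condAny h adjItems.items D x = true <;>
            simp [Option.or, hcx]
        have hD'h : ∀ x, D'.get? x = some h
            ↔ (D.get? x = none ∧ ∃ node ∈ f, x ∈ adjItems.getD node []) := by
          intro x
          cases hg : D.get? x with
          | some v =>
            have hv := I3 x v hg
            rw [hD'get x, hg]
            simp [Option.or]
            omega
          | none =>
            rw [hD'get x, hg, ← hcond x]
            by_cases hcx : condAny h adjItems.items D x = true <;> simp [Option.or, hcx]
        have hk' : n ≠ 0 → (n : Int) + (h + 1) ≤ mh + 1 := by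
          intro _
          have := hk (Nat.succ_ne_zero n)
          push_cast at this ⊢
          omega
        have I1' : ∀ x, x ∈ p.1 ↔ ((D'.get? x).isSome : Prop) := by
          intro x
          rw [P1 x, I1 x, hD'someIff x]
        have I2' : ∀ x, x ∈ p.2 ↔ D'.get? x = some (h + 1 - 1) := by
          intro x
          have hsimp : h + 1 - 1 = h := by ring
          rw [hsimp, P2 x, hD'h x]
          constructor
          · rintro (hx | ⟨n', hn', hx, hxv⟩)
            · simp at hx
            · exact ⟨(hxVnone x).1 hxv, n', hn', hx⟩
          · rintro ⟨hnone, n', hn', hx⟩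
            exact Or.inr ⟨n', hn', hx, (hxVnone x).2 hnone⟩
        have I3' : ∀ x v, D'.get? x = some v → v ≤ h + 1 - 1 := by
          intro x v hv
          rcases hD'val_aux h adjItems.items D x v (by rw [hr]; exact hv) with h2 | h2
          · have := I3 x v h2; omega
          · omega
        have I4' : ∀ t ∈ tg, D'.get? t = none := by
          intro t ht
          rw [hD'get t, I4 t ht]
          by_cases hcx : condAny h adjItems.items D t = true
          · exfalso
            obtain ⟨node, hnode, hx⟩ := (hcond t).1 hcx
            exact hnohit ⟨node, hnode, t, hx, (PySem.Set.mem_ofList tg t).2 ht⟩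
          · rw [if_neg hcx]; rfl
        by_cases hpe : p.2 = ([] : List Int)
        · rw [if_pos hpe]
          have hh := ih (h + 1) p.1 p.2 D' hk' I1' I2' I3' I4'
          rw [hpe, aLoop_nil_frontier adjItems _ mh n (h + 1) p.1] at hh
          exact hh
        · rw [if_neg hpe]
          exact ih (h + 1) p.1 p.2 D' hk' I1' I2' I3' I4'

theorem main_equiv (adjacency : List (Int × List Int)) (ceo_id : Int)
    (firm_board_ids : List Int) (max_hops : Int) :
    compute_ceo_firm_network_distance adjacency ceo_id firm_board_ids max_hops
      = compute_ceo_firm_network_distance_alt adjacency ceo_id firm_board_ids max_hops := by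
  unfold compute_ceo_firm_network_distance compute_ceo_firm_network_distance_alt
  by_cases hc : firm_board_ids.contains ceo_id = true
  · rw [if_pos hc, if_pos hc]
  · rw [if_neg hc, if_neg hc]
    have hcm : ceo_id ∉ firm_board_ids := by
      intro hm
      exact hc (by simpa [List.contains_eq_mem] using hm)
    apply sim (PySem.Dict.ofList adjacency) (PySem.Dict.nodup_keys_ofList adjacency)
      firm_board_ids max_hops max_hops.toNat 1 [ceo_id] [ceo_id]
      (PySem.Dict.empty.insert ceo_id 0)
    · intro hk0
      omega
    · intro x
      rw [PySem.Dict.get?_insert]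
      by_cases hx : x = ceo_id <;> simp [hx, PySem.Dict.get?_empty]
    · intro x
      rw [PySem.Dict.get?_insert]
      by_cases hx : x = ceo_id <;> simp [hx, PySem.Dict.get?_empty]
    · intro x v hv
      rw [PySem.Dict.get?_insert] at hv
      by_cases hx : x = ceo_id
      · rw [if_pos hx] at hv
        cases hv
        omega
      · rw [if_neg hx, PySem.Dict.get?_empty] at hv
        cases hv
    · intro t ht
      rw [PySem.Dict.get?_insert, if_neg (by rintro rfl; exact hcm ht), PySem.Dict.get?_empty]

-- ===== VERDICT (by name: the statement is the Claim_ definition above) =====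
theorem compute_ceo_firm_network_distance_spec : Claim_equal_compute_ceo_firm_network_distance := by
  intro adjacency ceo_id firm_board_ids max_hops _
  unfold Spec_compute_ceo_firm_network_distance
  exact main_equiv adjacency ceo_id firm_board_ids max_hops
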